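-- pv_equiv track=rewrite | github.com/03nnn/SoulLink_AI_Mental_health_tracker | Laptop-side/summarize.py | calculate_mood_score
-- ===== SOURCE A (Python) =====
-- def calculate_mood_score(emotions):
--     """Calculate mood score based on emotions"""
--     positive = {"energized", "excited", "happy", "hopeful", "inspired", "proud",
--                "balanced", "calm", "satisfied", "grateful", "loved", "relieved"}
--     neutral = {"unmotivated", "surprised", "confused", "overwhelmed", "bored", "tired"}
--     negative = {"angry", "annoyed", "frustrated", "nervous", "stressed", "worried",
--                "disappointed", "hopeless", "lonely", "sad", "weak", "guilty"}
--
--     if not emotions: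
--         return 3  # Default neutral
--
--     # Count emotion types
--     pos_count = sum(1 for e in emotions if e in positive)
--     neu_count = sum(1 for e in emotions if e in neutral)
--     neg_count = sum(1 for e in emotions if e in negative)
--
--     total = pos_count + neu_count + neg_count
--     if total == 0:
--         return 3
--
--     # Calculate weighted score (1-5 scale)
--     score = 3 + 2 * (pos_count - neg_count) / total
--
--     # Clamp to range 1-5
--     return max(1, min(5, round(score)))
-- ===== SOURCE B (Python) =====
-- def calculate_mood_score(emotions):
--     """Calculate mood score based on emotions"""
--     weight = {
--         "energized": 1, "excited": 1, "happy": 1, "hopeful": 1, "inspired": 1,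
--         "proud": 1, "balanced": 1, "calm": 1, "satisfied": 1, "grateful": 1,
--         "loved": 1, "relieved": 1,
--         "unmotivated": 0, "surprised": 0, "confused": 0, "overwhelmed": 0,
--         "bored": 0, "tired": 0,
--         "angry": -1, "annoyed": -1, "frustrated": -1, "nervous": -1,
--         "stressed": -1, "worried": -1, "disappointed": -1, "hopeless": -1,
--         "lonely": -1, "sad": -1, "weak": -1, "guilty": -1,
--     }
--
--     if not emotions:
--         return 3  # Default neutral
--
--     total = 0
--     net = 0
--     for e in emotions:
--         w = weight.get(e)
--         if w is not None:
--             total += 1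
--             net += w
--
--     if total == 0:
--         return 3
--
--     score = 3 + 2 * net / total
--     return max(1, min(5, round(score)))
-- ===== Notes on version B (the rewrite author's own statement) =====
-- stated objective: simpler
-- what changed: Replaces A's three separate counting passes over the emotion list (one membership scan per sentiment set) by a single pass that looks each word up in one word-to-weight dict and accumulates (total, net) directly.
import Mathlib
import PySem

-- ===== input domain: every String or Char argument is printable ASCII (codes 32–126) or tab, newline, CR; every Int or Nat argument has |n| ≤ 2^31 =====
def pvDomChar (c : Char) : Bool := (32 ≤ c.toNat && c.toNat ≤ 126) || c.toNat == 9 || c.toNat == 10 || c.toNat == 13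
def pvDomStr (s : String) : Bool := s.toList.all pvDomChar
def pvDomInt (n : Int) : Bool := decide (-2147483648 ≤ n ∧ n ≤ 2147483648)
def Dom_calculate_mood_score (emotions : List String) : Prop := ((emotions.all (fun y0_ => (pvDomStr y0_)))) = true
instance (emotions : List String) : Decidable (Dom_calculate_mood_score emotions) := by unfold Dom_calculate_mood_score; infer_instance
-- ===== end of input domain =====

-- B replaces A's three separate membership-counting passes by one pass over a single word→weight dict (objective: simpler).

-- ===== PORT A =====
def pvPositive : PySem.Set String := PySem.Set.ofList
  ["energized", "excited", "happy", "hopeful", "inspired", "proud",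
   "balanced", "calm", "satisfied", "grateful", "loved", "relieved"]
def pvNeutral : PySem.Set String := PySem.Set.ofList
  ["unmotivated", "surprised", "confused", "overwhelmed", "bored", "tired"]
def pvNegative : PySem.Set String := PySem.Set.ofList
  ["angry", "annoyed", "frustrated", "nervous", "stressed", "worried",
   "disappointed", "hopeless", "lonely", "sad", "weak", "guilty"]

-- Python's round() (banker's rounding, half to even) of the exact rational p/t, t > 0.  Both Pythons
-- compute 'round(3 + 2*k/total)' in floats; for the counts reachable here that float rounds to the
-- same integer as the exact rational, so this helper is the exact port of that 'round' for both.
def pyRoundRat (p t : Int) : Int :=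
  let q := PySem.Int.floordiv p t
  let r := PySem.Int.mod p t
  if 2 * r < t then q
  else if t < 2 * r then q + 1
  else if PySem.Int.mod q 2 = 0 then q else q + 1

def calculate_mood_score (emotions : List String) : Int :=
  if emotions = [] then 3
  else
    let pos_count : Int := emotions.foldl (fun acc e => if pvPositive.contains e then acc + 1 else acc) 0
    let neu_count : Int := emotions.foldl (fun acc e => if pvNeutral.contains e then acc + 1 else acc) 0
    let neg_count : Int := emotions.foldl (fun acc e => if pvNegative.contains e then acc + 1 else acc) 0
    let total := pos_count + neu_count + neg_count
    if total = 0 then 3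
    else max 1 (min 5 (pyRoundRat (3 * total + 2 * (pos_count - neg_count)) total))

-- ===== PORT B =====
def pvWeight : PySem.Dict String Int := PySem.Dict.ofList
  [("energized", 1), ("excited", 1), ("happy", 1), ("hopeful", 1), ("inspired", 1),
   ("proud", 1), ("balanced", 1), ("calm", 1), ("satisfied", 1), ("grateful", 1),
   ("loved", 1), ("relieved", 1),
   ("unmotivated", 0), ("surprised", 0), ("confused", 0), ("overwhelmed", 0),
   ("bored", 0), ("tired", 0),
   ("angry", -1), ("annoyed", -1), ("frustrated", -1), ("nervous", -1),
   ("stressed", -1), ("worried", -1), ("disappointed", -1), ("hopeless", -1),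
   ("lonely", -1), ("sad", -1), ("weak", -1), ("guilty", -1)]

-- B's loop body: w = weight.get(e); if w is not None: total += 1; net += w
def pvStep (tn : Int × Int) (e : String) : Int × Int :=
  match pvWeight.get? e with
  | none => tn
  | some w => (tn.1 + 1, tn.2 + w)

def calculate_mood_score_alt (emotions : List String) : Int :=
  if emotions = [] then 3
  else
    let tn := emotions.foldl pvStep ((0 : Int), (0 : Int))
    if tn.1 = 0 then 3
    else max 1 (min 5 (pyRoundRat (3 * tn.1 + 2 * tn.2) tn.1))

-- ===== PRECONDITION & SPEC =====
def Spec_calculate_mood_score (emotions : List String) (out : Int) : Prop := out = calculate_mood_score_alt emotions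
instance (emotions : List String) (out : Int) : Decidable (Spec_calculate_mood_score emotions out) := by unfold Spec_calculate_mood_score; infer_instance

-- ===== CLAIM (what is proved, stated in full; the proofs are below) =====
def Claim_equal_calculate_mood_score : Prop := ∀ (emotions : List String), Dom_calculate_mood_score emotions → Spec_calculate_mood_score emotions (calculate_mood_score emotions)

-- ===== LEMMAS AND PROOFS =====

def pvAllWords : List String :=
  ["energized", "excited", "happy", "hopeful", "inspired", "proud",
   "balanced", "calm", "satisfied", "grateful", "loved", "relieved",
   "unmotivated", "surprised", "confused", "overwhelmed", "bored", "tired",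
   "angry", "annoyed", "frustrated", "nervous", "stressed", "worried",
   "disappointed", "hopeless", "lonely", "sad", "weak", "guilty"]

-- B's dict lookup decomposed along A's three membership tests
theorem pvWeight_get (e : String) :
    pvWeight.get? e =
      if pvPositive.contains e then some 1
      else if pvNeutral.contains e then some 0
      else if pvNegative.contains e then some (-1)
      else none := by
  by_cases h : e ∈ pvAllWords
  · fin_cases h <;> decide
  · simp only [pvAllWords, List.mem_cons, List.not_mem_nil, or_false, not_or] at h
    obtain ⟨h1, h2, h3, h4, h5, h6, h7, h8, h9, h10, h11, h12, h13, h14, h15,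
      h16, h17, h18, h19, h20, h21, h22, h23, h24, h25, h26, h27, h28, h29, h30⟩ := h
    have hd : pvWeight = PySem.Dict.mk
      [("energized", 1), ("excited", 1), ("happy", 1), ("hopeful", 1), ("inspired", 1),
       ("proud", 1), ("balanced", 1), ("calm", 1), ("satisfied", 1), ("grateful", 1),
       ("loved", 1), ("relieved", 1),
       ("unmotivated", 0), ("surprised", 0), ("confused", 0), ("overwhelmed", 0),
       ("bored", 0), ("tired", 0),
       ("angry", -1), ("annoyed", -1), ("frustrated", -1), ("nervous", -1),
       ("stressed", -1), ("worried", -1), ("disappointed", -1), ("hopeless", -1),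
       ("lonely", -1), ("sad", -1), ("weak", -1), ("guilty", -1)] := by decide
    rw [hd]
    simp [pvPositive, pvNeutral, pvNegative, PySem.Set.ofList,
      beq_iff_eq, Ne.symm h1, Ne.symm h2, Ne.symm h3, Ne.symm h4, Ne.symm h5, Ne.symm h6,
      Ne.symm h7, Ne.symm h8, Ne.symm h9, Ne.symm h10, Ne.symm h11, Ne.symm h12, Ne.symm h13,
      Ne.symm h14, Ne.symm h15, Ne.symm h16, Ne.symm h17, Ne.symm h18, Ne.symm h19, Ne.symm h20,
      Ne.symm h21, Ne.symm h22, Ne.symm h23, Ne.symm h24, Ne.symm h25, Ne.symm h26, Ne.symm h27,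
      Ne.symm h28, Ne.symm h29, Ne.symm h30, h1, h2, h3, h4, h5, h6, h7, h8, h9, h10, h11, h12,
      h13, h14, h15, h16, h17, h18, h19, h20, h21, h22, h23, h24, h25, h26, h27, h28, h29, h30,
      PySem.Dict.get?]

-- the three sentiment sets are pairwise disjoint
theorem pvPos_neu (e : String) (hp : pvPositive.contains e = true) : pvNeutral.contains e = false := by
  have hm : e ∈ (["energized", "excited", "happy", "hopeful", "inspired", "proud",
      "balanced", "calm", "satisfied", "grateful", "loved", "relieved"] : List String) := by
    have := hp; simp only [pvPositive] at this
    simpa [PySem.Set.mem_ofList] using this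
  fin_cases hm <;> decide

theorem pvPos_neg (e : String) (hp : pvPositive.contains e = true) : pvNegative.contains e = false := by
  have hm : e ∈ (["energized", "excited", "happy", "hopeful", "inspired", "proud",
      "balanced", "calm", "satisfied", "grateful", "loved", "relieved"] : List String) := by
    have := hp; simp only [pvPositive] at this
    simpa [PySem.Set.mem_ofList] using this
  fin_cases hm <;> decide

theorem pvNeu_neg (e : String) (hu : pvNeutral.contains e = true) : pvNegative.contains e = false := by
  have hm : e ∈ (["unmotivated", "surprised", "confused", "overwhelmed", "bored", "tired"] : List String) := by
    have := hu; simp only [pvNeutral] at this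
    simpa [PySem.Set.mem_ofList] using this
  fin_cases hm <;> decide

-- B's loop body written as A's three indicators
theorem pvStep_eq (tn : Int × Int) (e : String) :
    pvStep tn e =
      (tn.1 + (if pvPositive.contains e then 1 else 0) + (if pvNeutral.contains e then 1 else 0)
            + (if pvNegative.contains e then 1 else 0),
       tn.2 + (if pvPositive.contains e then 1 else 0) - (if pvNegative.contains e then 1 else 0)) := by
  unfold pvStep
  rw [pvWeight_get e]
  cases hp : pvPositive.contains e with
  | true =>
      have hu : e ∉ pvNeutral := by simpa using pvPos_neu e hp
      have hg : e ∉ pvNegative := by simpa using pvPos_neg e hp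
      simp [hu, hg]
  | false =>
    cases hu : pvNeutral.contains e with
    | true =>
        have hg : e ∉ pvNegative := by simpa using pvNeu_neg e hu
        simp [hg]
    | false =>
      cases hg : pvNegative.contains e with
      | true => simp [sub_eq_add_neg]
      | false => simp

-- A's counting loop is countP
theorem pvShift (p : String → Bool) (l : List String) (a : Int) :
    l.foldl (fun acc e => if p e then acc + 1 else acc) a = a + l.countP p := by
  simp [pysem, List.countP_eq_length_filter]

-- B's single loop computes (total, net) = (pos+neu+neg, pos−neg) of A's three counts
theorem pvLoop (l : List String) (t n : Int) :
    l.foldl pvStep (t, n)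
      = (t + (l.countP (fun e => pvPositive.contains e) : Int)
           + (l.countP (fun e => pvNeutral.contains e) : Int)
           + (l.countP (fun e => pvNegative.contains e) : Int),
         n + (l.countP (fun e => pvPositive.contains e) : Int)
           - (l.countP (fun e => pvNegative.contains e) : Int)) := by
  induction l generalizing t n with
  | nil => simp
  | cons e l ih =>
    simp only [List.foldl_cons, List.countP_cons]
    rw [pvStep_eq]
    rw [ih]
    refine Prod.ext ?_ ?_ <;> dsimp only <;> split_ifs <;> push_cast <;> ring

-- ===== VERDICT (by name: the statement is the Claim_ definition above) =====
theorem calculate_mood_score_spec : Claim_equal_calculate_mood_score := by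
  intro emotions _
  unfold Spec_calculate_mood_score calculate_mood_score calculate_mood_score_alt
  by_cases he : emotions = []
  · simp [he]
  · simp only [he, if_false]
    rw [pvLoop, pvShift, pvShift, pvShift]
    simp only [zero_add]
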